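-- pv_equiv track=rewrite | github.com/datenlord/poseidon-spinal | src/reference_model/poseidon_python/basic.py | get_mds_matrix
-- ===== SOURCE A (Python) =====
-- p = 0x73eda753299d7d483339d80809a1d80553bda402fffe5bfeffffffff00000001
--
-- def get_inverse(x):
--     ''' get the modular inverse of x (mod p ) '''
--     ''' the inverse of x equals to pow(x,p-2) mod p '''
--     p_bin = bin(p-2)[2:]
--     inverse = 1
--     tmp = x % p
--     for i in range(len(p_bin)):
--         if p_bin[len(p_bin)-i-1]=='1':
--             inverse = (inverse * tmp)%p
--         tmp = (tmp * tmp)%p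
--
--     return inverse
--
-- def get_mds_matrix(t):
--
--     mds_x = range(0,t)
--     mds_y = range(t,2*t)
--     mds_matrix = []
--
--     for x in mds_x:
--         mds_vec = []
--         for y in mds_y:
--             mds_vec.append( get_inverse( x+y ) )
--         mds_matrix.append(mds_vec)
--
--     return mds_matrix
-- ===== SOURCE B (Python) =====
-- p = 0x73eda753299d7d483339d80809a1d80553bda402fffe5bfeffffffff00000001
--
-- def _modpow(x, e):
--     ''' x**e mod p by recursive binary exponentiation (MSB-first) '''
--     if e == 0:
--         return 1
--     r = _modpow(x, e >> 1)
--     r = r * r % p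
--     if e & 1:
--         r = r * x % p
--     return r
--
-- def get_mds_matrix(t):
--     # the t*t sums x+y only take the 2t-1 distinct values t .. 3t-2:
--     # invert each distinct sum once, then each row x is a window of that table
--     invs = [_modpow(s, p - 2) for s in range(t, 3 * t - 1)]
--     return [invs[x:x + t] for x in range(t)]
-- ===== Notes on version B (the rewrite author's own statement) =====
-- stated objective: faster
-- what changed: Instead of running the hardwired square-and-multiply bit loop once per matrix cell, B inverts each of the 2t-1 distinct sums t..3t-2 once with a recursive binary modular exponentiation and builds every row as a slice (window) of that table.
import Mathlib
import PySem

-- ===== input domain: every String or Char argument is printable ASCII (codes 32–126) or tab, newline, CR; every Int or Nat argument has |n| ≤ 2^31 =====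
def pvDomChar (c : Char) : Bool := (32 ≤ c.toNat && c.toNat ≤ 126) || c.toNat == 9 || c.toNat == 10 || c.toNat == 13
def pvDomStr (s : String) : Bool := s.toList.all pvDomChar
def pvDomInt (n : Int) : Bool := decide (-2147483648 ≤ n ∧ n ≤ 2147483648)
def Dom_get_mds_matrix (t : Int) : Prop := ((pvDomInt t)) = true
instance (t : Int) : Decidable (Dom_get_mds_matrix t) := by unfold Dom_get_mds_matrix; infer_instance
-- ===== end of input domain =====

-- B inverts each of the 2t-1 distinct sums once (recursive binary exponentiation) and slices rows
-- out of that table, instead of A's per-cell bit-string square-and-multiply loop (faster).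

-- the module constant p
def pvP : Int := 0x73eda753299d7d483339d80809a1d80553bda402fffe5bfeffffffff00000001

-- ===== PORT A =====
-- 'for i in range(len(p_bin))' reading p_bin[len-1-i] traverses p_bin in reverse; every index is
-- in range, so the loop is exactly this recursion over the reversed character list.
def pvALoop (bits : List Char) (inverse tmp : Int) : Int :=
  match bits with
  | [] => inverse
  | c :: rest =>
      pvALoop rest (if c = '1' then PySem.Int.mod (inverse * tmp) pvP else inverse)
        (PySem.Int.mod (tmp * tmp) pvP)

-- bin(p-2)[2:] is PySem.Int.toBinChars (pvP - 2) (exact for the nonnegative constant p-2)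
def get_inverse (x : Int) : Int :=
  pvALoop ((PySem.Int.toBinChars (pvP - 2)).reverse) 1 (PySem.Int.mod x pvP)

def get_mds_matrix (t : Int) : List (List Int) :=
  (PySem.List.pyRange 0 t 1).map (fun x =>
    (PySem.List.pyRange t (2 * t) 1).map (fun y => get_inverse (x + y)))

-- ===== PORT B =====
-- _modpow(x, e): recursive binary exponentiation mod p (e is the nonnegative exponent)
def pvModPow (x : Int) (e : Nat) : Int :=
  if e = 0 then 1
  else
    let r := pvModPow x (e / 2)
    let r := PySem.Int.mod (r * r) pvP
    if e % 2 = 1 then PySem.Int.mod (r * x) pvP else r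
decreasing_by exact Nat.div_lt_self (Nat.pos_of_ne_zero (by assumption)) (by omega)

def get_mds_matrix_alt (t : Int) : List (List Int) :=
  let invs := (PySem.List.pyRange t (3 * t - 1) 1).map (fun s => pvModPow s (pvP - 2).toNat)
  (PySem.List.pyRange 0 t 1).map (fun x => PySem.List.slice invs (some x) (some (x + t)))

-- ===== PRECONDITION & SPEC =====
def Spec_get_mds_matrix (t : Int) (out : List (List Int)) : Prop := out = get_mds_matrix_alt t
instance (t : Int) (out : List (List Int)) : Decidable (Spec_get_mds_matrix t out) := by unfold Spec_get_mds_matrix; infer_instance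

-- ===== CLAIM (what is proved, stated in full; the proofs are below) =====
def Claim_equal_get_mds_matrix : Prop := ∀ (t : Int), Dom_get_mds_matrix t → Spec_get_mds_matrix t (get_mds_matrix t)

-- ===== LEMMAS AND PROOFS =====

-- value of an LSB-first list of binary digit characters
def pvBitsVal : List Char → Nat
  | [] => 0
  | c :: r => (if c = '1' then 1 else 0) + 2 * pvBitsVal r

theorem pvP_pos : (0 : Int) < pvP := by decide

theorem pvMod_eq (a : Int) : PySem.Int.mod a pvP = a % pvP :=
  PySem.Int.mod_eq_emod_of_pos pvP_pos

theorem pvEmod_modEq (a : Int) : a % pvP ≡ a [ZMOD pvP] := by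
  have := Int.emod_emod_of_dvd a (dvd_refl pvP)
  exact this

-- A's loop computes inv * tmp^(value of the remaining bits) mod p
theorem pvALoop_cong (L : List Char) (inv tmp : Int) :
    pvALoop L inv tmp ≡ inv * tmp ^ pvBitsVal L [ZMOD pvP] := by
  induction L generalizing inv tmp with
  | nil => simp [pvALoop, pvBitsVal]
  | cons c r ih =>
      have h1 : (if c = '1' then PySem.Int.mod (inv * tmp) pvP else inv)
          ≡ inv * tmp ^ (if c = '1' then 1 else 0) [ZMOD pvP] := by
        by_cases hc : c = '1' <;> simp [hc, pvMod_eq]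
        · exact pvEmod_modEq _
      have h2 : PySem.Int.mod (tmp * tmp) pvP ≡ tmp ^ 2 [ZMOD pvP] := by
        rw [pvMod_eq]
        calc tmp * tmp % pvP ≡ tmp * tmp [ZMOD pvP] := pvEmod_modEq _
          _ = tmp ^ 2 := by ring
      calc pvALoop (c :: r) inv tmp
          = pvALoop r (if c = '1' then PySem.Int.mod (inv * tmp) pvP else inv)
              (PySem.Int.mod (tmp * tmp) pvP) := by rfl
        _ ≡ (if c = '1' then PySem.Int.mod (inv * tmp) pvP else inv)
              * (PySem.Int.mod (tmp * tmp) pvP) ^ pvBitsVal r [ZMOD pvP] := ih _ _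
        _ ≡ (inv * tmp ^ (if c = '1' then 1 else 0)) * (tmp ^ 2) ^ pvBitsVal r [ZMOD pvP] :=
              Int.ModEq.mul h1 (Int.ModEq.pow _ h2)
        _ = inv * tmp ^ pvBitsVal (c :: r) := by
              simp only [pvBitsVal]; rw [pow_add, pow_mul]; ring

-- once the loop has reduced the accumulator, it stays reduced
theorem pvALoop_range_keep (L : List Char) (inv tmp : Int)
    (h0 : 0 ≤ inv) (h1 : inv < pvP) :
    0 ≤ pvALoop L inv tmp ∧ pvALoop L inv tmp < pvP := by
  induction L generalizing inv tmp with
  | nil => exact ⟨h0, h1⟩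
  | cons c r ih =>
      show 0 ≤ pvALoop r _ _ ∧ pvALoop r _ _ < pvP
      by_cases hc : c = '1'
      · simp only [hc, if_pos, pvMod_eq]
        exact ih _ _ (Int.emod_nonneg _ (by decide)) (Int.emod_lt_of_pos _ pvP_pos)
      · simp only [if_neg hc]
        exact ih _ _ h0 h1

-- a '1' bit reduces the accumulator mod p
theorem pvALoop_range (L : List Char) (inv tmp : Int) (hm : '1' ∈ L) :
    0 ≤ pvALoop L inv tmp ∧ pvALoop L inv tmp < pvP := by
  induction L generalizing inv tmp with
  | nil => cases hm
  | cons c r ih =>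
      show 0 ≤ pvALoop r _ _ ∧ pvALoop r _ _ < pvP
      by_cases hc : c = '1'
      · simp only [hc, if_pos, pvMod_eq]
        exact pvALoop_range_keep _ _ _ (Int.emod_nonneg _ (by decide)) (Int.emod_lt_of_pos _ pvP_pos)
      · have hm' : '1' ∈ r := by
          rcases List.mem_cons.mp hm with h | h
          · exact absurd h.symm hc
          · exact h
        simp only [if_neg hc]
        exact ih _ _ hm'

-- the bit loop's string is the binary expansion: its reversed digit-character value is n
theorem pvBitsVal_toDigits (n : Nat) : pvBitsVal ((Nat.toDigits 2 n).reverse) = n := by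
  induction n using Nat.strong_induction_on with
  | _ n ih =>
      by_cases h : n < 2
      · interval_cases n <;> decide
      · rw [Nat.toDigits_of_base_le (by omega) (by omega), List.reverse_append,
          List.reverse_singleton, List.singleton_append]
        show (if (n % 2).digitChar = '1' then 1 else 0) + 2 * pvBitsVal (Nat.toDigits 2 (n / 2)).reverse = n
        rw [ih (n / 2) (by omega)]
        have h2 : n % 2 = 0 ∨ n % 2 = 1 := by omega
        rcases h2 with h2 | h2 <;> rw [h2]
        · rw [if_neg (by decide)]; omega
        · rw [if_pos (by decide)]; omega

theorem pvMem_toDigits (n : Nat) (hn : 0 < n) : '1' ∈ Nat.toDigits 2 n := by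
  induction n using Nat.strong_induction_on with
  | _ n ih =>
      by_cases h : n < 2
      · have hn1 : n = 1 := by omega
        subst hn1
        rw [Nat.toDigits_of_lt_base (by omega)]
        exact List.mem_singleton.mpr rfl
      · rw [Nat.toDigits_of_base_le (by omega) (by omega)]
        exact List.mem_append_left _ (ih (n / 2) (by omega) (by omega))

theorem pvBinChars_eq : PySem.Int.toBinChars (pvP - 2) = Nat.toDigits 2 (pvP - 2).toNat := by
  show (if pvP - 2 < 0 then _ else _) = _
  rw [if_neg (by decide)]

theorem pvBits_mem : '1' ∈ (PySem.Int.toBinChars (pvP - 2)).reverse := by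
  rw [pvBinChars_eq, List.mem_reverse]
  exact pvMem_toDigits _ (by decide)

theorem pvBits_val : pvBitsVal ((PySem.Int.toBinChars (pvP - 2)).reverse) = (pvP - 2).toNat := by
  rw [pvBinChars_eq]
  exact pvBitsVal_toDigits _

-- B's recursion computes x^e mod p
theorem pvModPow_cong (e : Nat) (x : Int) : pvModPow x e ≡ x ^ e [ZMOD pvP] := by
  induction e using Nat.strong_induction_on with
  | _ e ih =>
      rw [pvModPow]
      by_cases he : e = 0
      · simp [he]
      · have ihh := ih (e / 2) (Nat.div_lt_self (Nat.pos_of_ne_zero he) (by omega))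
        have hred : (pvModPow x (e / 2) * pvModPow x (e / 2)) % pvP
            ≡ x ^ (e / 2) * x ^ (e / 2) [ZMOD pvP] :=
          (pvEmod_modEq _).trans (Int.ModEq.mul ihh ihh)
        by_cases hp : e % 2 = 1
        · simp only [if_neg he, if_pos hp, pvMod_eq]
          calc pvModPow x (e / 2) * pvModPow x (e / 2) % pvP * x % pvP
              ≡ pvModPow x (e / 2) * pvModPow x (e / 2) % pvP * x [ZMOD pvP] := pvEmod_modEq _
            _ ≡ (x ^ (e / 2) * x ^ (e / 2)) * x [ZMOD pvP] := Int.ModEq.mul hred Int.ModEq.rfl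
            _ = x ^ e := by rw [← pow_add, ← pow_succ]; congr 1; omega
        · simp only [if_neg he, if_neg hp, pvMod_eq]
          calc pvModPow x (e / 2) * pvModPow x (e / 2) % pvP
              ≡ x ^ (e / 2) * x ^ (e / 2) [ZMOD pvP] := hred
            _ = x ^ e := by rw [← pow_add]; congr 1; omega

theorem pvModPow_range (e : Nat) (x : Int) (he : e ≠ 0) :
    0 ≤ pvModPow x e ∧ pvModPow x e < pvP := by
  rw [pvModPow]
  by_cases hp : e % 2 = 1
  · simp only [if_neg he, if_pos hp, pvMod_eq]
    exact ⟨Int.emod_nonneg _ (by decide), Int.emod_lt_of_pos _ pvP_pos⟩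
  · simp only [if_neg he, if_neg hp, pvMod_eq]
    exact ⟨Int.emod_nonneg _ (by decide), Int.emod_lt_of_pos _ pvP_pos⟩

-- pointwise: A's per-cell inverse equals B's table entry
theorem pvInv_eq (x : Int) : get_inverse x = pvModPow x (pvP - 2).toNat := by
  have hA := pvALoop_cong ((PySem.Int.toBinChars (pvP - 2)).reverse) 1 (PySem.Int.mod x pvP)
  rw [pvBits_val] at hA
  have hA' : get_inverse x ≡ x ^ (pvP - 2).toNat [ZMOD pvP] := by
    calc get_inverse x ≡ 1 * (PySem.Int.mod x pvP) ^ (pvP - 2).toNat [ZMOD pvP] := hA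
      _ = (x % pvP) ^ (pvP - 2).toNat := by rw [pvMod_eq]; ring
      _ ≡ x ^ (pvP - 2).toNat [ZMOD pvP] := Int.ModEq.pow _ (pvEmod_modEq x)
  have hB' := pvModPow_cong (pvP - 2).toNat x
  have hAr : 0 ≤ get_inverse x ∧ get_inverse x < pvP :=
    pvALoop_range _ 1 (PySem.Int.mod x pvP) pvBits_mem
  have hBr := pvModPow_range (pvP - 2).toNat x (by decide)
  have : get_inverse x % pvP = pvModPow x (pvP - 2).toNat % pvP := hA'.trans hB'.symm
  rwa [Int.emod_eq_of_lt hAr.1 hAr.2, Int.emod_eq_of_lt hBr.1 hBr.2] at this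

-- row x of A is the window invs[x : x+t] of B's table
theorem pvRow_eq (t x : Int) (hx0 : 0 ≤ x) (hxt : x < t) :
    (PySem.List.pyRange t (2 * t) 1).map (fun y => pvModPow (x + y) (pvP - 2).toNat)
      = PySem.List.slice
          ((PySem.List.pyRange t (3 * t - 1) 1).map (fun s => pvModPow s (pvP - 2).toNat))
          (some x) (some (x + t)) := by
  rw [PySem.List.slice_toNat _ hx0 (by omega)]
  apply List.ext_getElem
  · simp [PySem.List.length_pyRange_one]
    omega
  · intro i h1 h2
    have hi : i < t.toNat := by
      simp [PySem.List.length_pyRange_one] at h1; omega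
    have hlen : (PySem.List.pyRange t (3 * t - 1) 1).length = (2 * t - 1).toNat := by
      simp [PySem.List.length_pyRange_one]; omega
    have hidx : x.toNat + i < ((PySem.List.pyRange t (3 * t - 1) 1).map
        (fun s => pvModPow s (pvP - 2).toNat)).length := by
      simp [hlen]; omega
    rw [List.getElem_take, List.getElem_drop, List.getElem_map, List.getElem_map,
      PySem.List.getElem_pyRange_one, PySem.List.getElem_pyRange_one]
    congr 1
    omega

-- ===== VERDICT (by name: the statement is the Claim_ definition above) =====
theorem get_mds_matrix_spec : Claim_equal_get_mds_matrix := by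
  intro t _
  show get_mds_matrix t = get_mds_matrix_alt t
  unfold get_mds_matrix get_mds_matrix_alt
  apply List.map_congr_left
  intro x hx
  obtain ⟨hx0, hxt⟩ := PySem.List.mem_pyRange_one.mp hx
  calc (PySem.List.pyRange t (2 * t) 1).map (fun y => get_inverse (x + y))
      = (PySem.List.pyRange t (2 * t) 1).map (fun y => pvModPow (x + y) (pvP - 2).toNat) := by
        apply List.map_congr_left; intro y _; exact pvInv_eq (x + y)
    _ = _ := pvRow_eq t x hx0 hxt
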